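-- pv_equiv track=rewrite | github.com/cjerdonek/rcv-results-reporter | src/rcvresults/summary.py | make_candidate_summary
-- ===== SOURCE A (Python) =====
-- def make_candidate_summary(rounds, name):
--     # Initialize highest_round to 1 in case the candidate has zero
--     # votes in the first round.
--     highest_round = 1
--     highest_vote = 0
--     for round_number, round_data in enumerate(rounds, start=1):
--         votes = round_data['votes']
--         if not votes:
--             # Then the candidate had zero votes in the first round or is
--             # eliminated in this round.
--             break
--
--         highest_round = round_number
--         # The vote totals should only stay the same or increase.
--         if votes < highest_vote:
--             raise AssertionError(
--                 f'votes decreased in round {round_number} for {name!r}: '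
--                 f'{votes} < {highest_vote}'
--             )
--         highest_vote = votes
--
--     summary = {
--         'highest_round': highest_round,
--         'highest_vote': highest_vote,
--     }
--     return summary
-- ===== SOURCE B (Python) =====
-- def make_candidate_summary(rounds, name):
--     # Phase 1: collect the leading prefix of truthy vote totals.
--     prefix = []
--     for round_data in rounds:
--         votes = round_data['votes']
--         if not votes:
--             break
--         prefix.append(votes)
--     # Phase 2: validate that the collected totals never decrease.
--     prev = 0
--     for round_number, votes in enumerate(prefix, start=1):
--         if votes < prev:
--             raise AssertionError(
--                 f'votes decreased in round {round_number} for {name!r}: '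
--                 f'{votes} < {prev}'
--             )
--         prev = votes
--     # Phase 3: derive the summary from the prefix alone.
--     return {
--         'highest_round': len(prefix) or 1,
--         'highest_vote': prefix[-1] if prefix else 0,
--     }
-- ===== Notes on version B (the rewrite author's own statement) =====
-- stated objective: alternative
-- what changed: Replaces A's single fused scan that tracks highest_round/highest_vote with three phases: collect the truthy-votes prefix, validate it for monotonicity, then derive both summary fields from the prefix (len or 1, last or 0).
-- outside the precondition, e.g. on make_candidate_summary([{'votes': 5}, {'votes': 3}], 'X'): A raises AssertionError, B raises AssertionError; on make_candidate_summary([{'x': 1}], 'X'): A raises KeyError, B raises KeyError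
import Mathlib
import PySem

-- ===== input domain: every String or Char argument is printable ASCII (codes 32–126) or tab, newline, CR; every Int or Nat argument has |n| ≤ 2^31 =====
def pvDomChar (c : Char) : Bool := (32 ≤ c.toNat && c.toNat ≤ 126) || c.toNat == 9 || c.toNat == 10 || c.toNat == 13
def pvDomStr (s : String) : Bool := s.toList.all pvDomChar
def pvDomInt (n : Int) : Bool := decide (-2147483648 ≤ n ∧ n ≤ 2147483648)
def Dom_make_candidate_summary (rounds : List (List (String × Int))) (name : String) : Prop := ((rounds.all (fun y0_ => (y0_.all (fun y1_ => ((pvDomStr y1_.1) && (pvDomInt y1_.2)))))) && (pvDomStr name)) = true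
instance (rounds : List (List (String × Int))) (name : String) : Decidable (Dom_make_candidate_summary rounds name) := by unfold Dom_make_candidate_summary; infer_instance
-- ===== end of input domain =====

-- B replaces A's fused scan with collect-prefix → validate → derive phases (alternative decomposition, same cost).


-- round_data['votes']: first-match lookup in the association list (Python dict access)
def pvVotesOf (r : List (String × Int)) : Option Int := (PySem.Dict.mk r).get? "votes"

-- ===== PORT A =====
-- A's fused loop: state (round_number, highest_round, highest_vote); 'none' lookup = KeyError and
-- 'v < hv' = AssertionError are excluded by Pre_, so those branches just stop with the current state.
def pvGoA : List (List (String × Int)) → Int → Int → Int → Int × Int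
  | [], _, hr, hv => (hr, hv)
  | r :: rest, n, hr, hv =>
    match pvVotesOf r with
    | none => (hr, hv)              -- KeyError (outside Pre_)
    | some v =>
      if v = 0 then (hr, hv)        -- break
      else if v < hv then (n, hv)   -- AssertionError (outside Pre_)
      else pvGoA rest (n + 1) n v

def make_candidate_summary (rounds : List (List (String × Int))) (name : String) : List (String × Int) :=
  let s := pvGoA rounds 1 1 0
  [("highest_round", s.1), ("highest_vote", s.2)]

-- ===== PORT B =====
-- Phase 1: collect the leading prefix of truthy vote totals ('none' lookup = KeyError, outside Pre_).
def pvCollect : List (List (String × Int)) → List Int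
  | [] => []
  | r :: rest =>
    match pvVotesOf r with
    | none => []                    -- KeyError (outside Pre_)
    | some v => if v = 0 then [] else v :: pvCollect rest

-- Phase 2: validation pass; 'false' = AssertionError (outside Pre_).
def pvValidate : Int → List Int → Bool
  | _, [] => true
  | prev, v :: rest => if v < prev then false else pvValidate v rest

def make_candidate_summary_alt (rounds : List (List (String × Int))) (name : String) : List (String × Int) :=
  let pfx := pvCollect rounds
  if pvValidate 0 pfx then
    [("highest_round", if pfx.length = 0 then 1 else (pfx.length : Int)),
     ("highest_vote", pfx.getLastD 0)]
  else []                           -- AssertionError (outside Pre_)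

-- ===== PRECONDITION & SPEC =====
def pvVotesAt (rounds : List (List (String × Int))) (i : Nat) : Option Int :=
  pvVotesOf (rounds.getD i [])

-- Pre_ excludes exactly the inputs where A raises: a KeyError (some round reached by the scan has no
-- 'votes' key) or an AssertionError (a truthy vote total smaller than its predecessor, or negative in
-- the first reached round).
def Pre_make_candidate_summary (rounds : List (List (String × Int))) (name : String) : Prop :=
  ∀ i : Nat, i < rounds.length →
    (∀ j : Nat, j < i → (pvVotesAt rounds j).getD 0 ≠ 0) →
    ((pvVotesAt rounds i).isSome ∧
      ((pvVotesAt rounds i).getD 0 ≠ 0 →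
        (if i = 0 then 0 else (pvVotesAt rounds (i - 1)).getD 0) ≤ (pvVotesAt rounds i).getD 0))

instance (rounds : List (List (String × Int))) (name : String) : Decidable (Pre_make_candidate_summary rounds name) := by unfold Pre_make_candidate_summary; infer_instance

def pvWitness_make_candidate_summary : (List (List (String × Int))) × String :=
  ([[("votes", 5)], [("votes", 7)], [("votes", 0)]], "Ann")

def Spec_make_candidate_summary (rounds : List (List (String × Int))) (name : String) (out : List (String × Int)) : Prop := out = make_candidate_summary_alt rounds name
instance (rounds : List (List (String × Int))) (name : String) (out : List (String × Int)) : Decidable (Spec_make_candidate_summary rounds name out) := by unfold Spec_make_candidate_summary; infer_instance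

-- ===== CLAIM (what is proved, stated in full; the proofs are below) =====
def Claim_equal_make_candidate_summary : Prop := ∀ (rounds : List (List (String × Int))) (name : String), Dom_make_candidate_summary rounds name → Pre_make_candidate_summary rounds name → Spec_make_candidate_summary rounds name (make_candidate_summary rounds name)

-- ===== LEMMAS AND PROOFS =====

-- scan-shaped restatement of Pre_ used by the inductions
def pvScanOK (prev : Int) : List (List (String × Int)) → Prop
  | [] => True
  | r :: rest =>
    match pvVotesOf r with
    | none => False
    | some v => v = 0 ∨ (v ≠ 0 ∧ prev ≤ v ∧ pvScanOK v rest)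

lemma pvVotesAt_cons_succ (r : List (String × Int)) (rest : List (List (String × Int))) (i : Nat) :
    pvVotesAt (r :: rest) (i + 1) = pvVotesAt rest i := by
  simp [pvVotesAt]

lemma pre_to_scan (rounds : List (List (String × Int))) (prev : Int)
    (h : ∀ i : Nat, i < rounds.length →
      (∀ j : Nat, j < i → (pvVotesAt rounds j).getD 0 ≠ 0) →
      ((pvVotesAt rounds i).isSome ∧
        ((pvVotesAt rounds i).getD 0 ≠ 0 →
          (if i = 0 then prev else (pvVotesAt rounds (i - 1)).getD 0) ≤ (pvVotesAt rounds i).getD 0))) :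
    pvScanOK prev rounds := by
  induction rounds generalizing prev with
  | nil => trivial
  | cons r rest ih =>
    have h0 := h 0 (by simp) (by omega)
    have hv0 : (pvVotesAt (r :: rest) 0) = pvVotesOf r := by simp [pvVotesAt]
    rw [hv0] at h0
    obtain ⟨hs, hle⟩ := h0
    match hvr : pvVotesOf r with
    | none => rw [hvr] at hs; simp at hs
    | some v =>
      rw [hvr] at hle
      simp only [pvScanOK, hvr]
      by_cases hz : v = 0
      · exact Or.inl hz
      · refine Or.inr ⟨hz, by simpa [hz] using hle, ih v ?_⟩
        intro i hi htruthy
        have htruthy' : ∀ j : Nat, j < i + 1 → (pvVotesAt (r :: rest) j).getD 0 ≠ 0 := by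
          intro j hj
          cases j with
          | zero => rw [hv0, hvr]; simpa using hz
          | succ j' => rw [pvVotesAt_cons_succ]; exact htruthy j' (by omega)
        have := h (i + 1) (by simpa using hi) htruthy'
        rw [pvVotesAt_cons_succ] at this
        refine ⟨this.1, fun ht => ?_⟩
        have := this.2 ht
        cases i with
        | zero => simpa [hv0, hvr] using this
        | succ i' => simpa [pvVotesAt_cons_succ] using this

lemma scan_validate (rounds : List (List (String × Int))) (prev : Int)
    (h : pvScanOK prev rounds) : pvValidate prev (pvCollect rounds) = true := by
  induction rounds generalizing prev with
  | nil => rfl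
  | cons r rest ih =>
    simp only [pvScanOK] at h
    match hvr : pvVotesOf r with
    | none => rw [hvr] at h; exact absurd h (by simp)
    | some v =>
      rw [hvr] at h
      simp only [pvCollect, hvr]
      by_cases hz : v = 0
      · simp [hz, pvValidate]
      · rcases h with h | ⟨_, hle, hrest⟩
        · exact absurd h hz
        · rw [if_neg hz]
          simp only [pvValidate]
          rw [if_neg (by omega : ¬ v < prev)]
          exact ih v hrest

lemma goA_eq_collect (rounds : List (List (String × Int))) (n hr hv : Int)
    (h : pvScanOK hv rounds) :
    pvGoA rounds n hr hv =
      (if pvCollect rounds = [] then hr else n + (pvCollect rounds).length - 1,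
        (pvCollect rounds).getLastD hv) := by
  induction rounds generalizing n hr hv with
  | nil => simp [pvGoA, pvCollect]
  | cons r rest ih =>
    simp only [pvScanOK] at h
    match hvr : pvVotesOf r with
    | none => rw [hvr] at h; exact absurd h (by simp)
    | some v =>
      rw [hvr] at h
      simp only [pvGoA, pvCollect, hvr]
      by_cases hz : v = 0
      · simp [hz]
      · rcases h with h | ⟨_, hle, hrest⟩
        · exact absurd h hz
        · rw [if_neg hz, if_neg hz, if_neg (by omega : ¬ v < hv), ih (n + 1) n v hrest]
          have hlast : (v :: pvCollect rest).getLastD hv = (pvCollect rest).getLastD v := by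
            cases hc : pvCollect rest with
            | nil => simp
            | cons a l => simp [List.getLastD]
          rw [hlast]
          by_cases hc : pvCollect rest = []
          · simp [hc]
          · have : ¬ (v :: pvCollect rest) = [] := by simp
            rw [if_neg this, if_neg hc]
            simp only [List.length_cons]
            congr 1
            push_cast
            ring

-- ===== VERDICT (by name: the statement is the Claim_ definition above) =====
theorem make_candidate_summary_spec : Claim_equal_make_candidate_summary := by
  intro rounds name _ hpre
  unfold Spec_make_candidate_summary make_candidate_summary make_candidate_summary_alt
  dsimp only
  have hscan : pvScanOK 0 rounds := pre_to_scan rounds 0 hpre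
  rw [scan_validate rounds 0 hscan, if_pos rfl]
  rw [goA_eq_collect rounds 1 1 0 hscan]
  by_cases hc : pvCollect rounds = []
  · simp [hc]
  · have hlen : (pvCollect rounds).length ≠ 0 := by simpa [List.length_eq_zero_iff] using hc
    simp only [if_neg hc, if_neg hlen]
    congr 2
    ring
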